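-- pv_equiv track=rewrite | github.com/Shilenkovv/Algorithms_PyGen_bg | 10_Optimization_methods_for_problem_solving/10_1_3.py | min_valid_index
-- ===== SOURCE A (Python) =====
-- def min_valid_index(nums: list[int], k: int, m: int) -> list[int]:
--     prefix_sum = [0] * (len(nums) + 1)
--     for i in range(len(nums)):
--         prefix_sum[i + 1] = prefix_sum[i] + nums[i]
--
--     for i in range(len(prefix_sum) - k - 1):
--         if prefix_sum[i + k + 1] - prefix_sum[i] == m:
--             return i
--     return -1
-- ===== SOURCE B (Python) =====
-- def min_valid_index(nums: list[int], k: int, m: int) -> int: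
--     n = len(nums)
--     if n - k <= 0:
--         return -1
--     s = sum(nums[:k + 1])
--     if s == m:
--         return 0
--     for i in range(1, n - k):
--         s += nums[i + k] - nums[i - 1]
--         if s == m:
--             return i
--     return -1
-- ===== Notes on version B (the rewrite author's own statement) =====
-- stated objective: simpler
-- what changed: Replaced the prefix-sum array with a single running window sum updated in place while sliding (add the entering element, subtract the leaving one), removing the array allocation pass.
-- outside the precondition, e.g. on min_valid_index([1, 2], -2, 3): A returns 0, B raises IndexError; on min_valid_index([], -3, 0): A raises IndexError, B returns 0
import Mathlib
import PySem

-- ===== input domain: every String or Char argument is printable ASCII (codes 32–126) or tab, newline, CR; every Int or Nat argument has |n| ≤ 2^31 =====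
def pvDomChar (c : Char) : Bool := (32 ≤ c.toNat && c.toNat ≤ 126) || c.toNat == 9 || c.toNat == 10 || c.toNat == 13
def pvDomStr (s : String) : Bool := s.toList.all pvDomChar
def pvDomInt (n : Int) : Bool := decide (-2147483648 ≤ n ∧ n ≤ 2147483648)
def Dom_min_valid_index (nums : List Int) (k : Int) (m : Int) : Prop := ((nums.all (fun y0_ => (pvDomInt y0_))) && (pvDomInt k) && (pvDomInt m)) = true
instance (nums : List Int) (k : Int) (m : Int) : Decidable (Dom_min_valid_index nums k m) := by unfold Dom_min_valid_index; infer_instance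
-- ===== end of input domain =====

-- B replaces A's prefix-sum array by a single running window sum updated while sliding; return values proved equal for k ≥ -1.


-- ===== PORT A =====
-- 'prefix_sum[i+1] = prefix_sum[i] + nums[i]' fills the preallocated array left to right;
-- ported as appending prefix_sum[i] (the last filled entry, i.e. index -1) + nums[i].
def pvPrefixA (nums : List Int) : List Int :=
  nums.foldl (fun ps x => ps ++ [PySem.List.pyGetD ps (-1) 0 + x]) [0]

-- 'for i in range(len(prefix_sum) - k - 1): if prefix_sum[i+k+1] - prefix_sum[i] == m: return i'
def pvFindA (ps : List Int) (k m : Int) : List Int → Int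
  | [] => -1
  | i :: rest =>
      if PySem.List.pyGetD ps (i + k + 1) 0 - PySem.List.pyGetD ps i 0 = m then i
      else pvFindA ps k m rest

def min_valid_index (nums : List Int) (k : Int) (m : Int) : Int :=
  let ps := pvPrefixA nums
  pvFindA ps k m (PySem.List.pyRange 0 ((ps.length : Int) - k - 1) 1)

-- ===== PORT B =====
-- 'for i in range(1, n - k): s += nums[i+k] - nums[i-1]; if s == m: return i'
def pvSlideB (nums : List Int) (k m : Int) (s : Int) : List Int → Int
  | [] => -1
  | i :: rest =>
      let s' := s + PySem.List.pyGetD nums (i + k) 0 - PySem.List.pyGetD nums (i - 1) 0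
      if s' = m then i else pvSlideB nums k m s' rest

def min_valid_index_alt (nums : List Int) (k : Int) (m : Int) : Int :=
  if (nums.length : Int) - k ≤ 0 then -1
  else
    let s := (PySem.List.slice nums none (some (k + 1))).sum
    if s = m then 0
    else pvSlideB nums k m s (PySem.List.pyRange 1 ((nums.length : Int) - k) 1)

-- ===== PRECONDITION & SPEC =====
-- Pre_ excludes k ≤ -2 (a negative window length): there A's negative prefix-sum indices wrap
-- around the array, so A raises IndexError except when such an accidental wrapped sum hits m
-- first — and B's own negative-index arithmetic there likewise either raises or returns an accidental value.
def Pre_min_valid_index (nums : List Int) (k : Int) (m : Int) : Prop := -1 ≤ k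
instance (nums : List Int) (k : Int) (m : Int) : Decidable (Pre_min_valid_index nums k m) := by unfold Pre_min_valid_index; infer_instance
def pvWitness_min_valid_index : List Int × Int × Int := ([1, 2, 3], 1, 5)

def Spec_min_valid_index (nums : List Int) (k : Int) (m : Int) (out : Int) : Prop := out = min_valid_index_alt nums k m
instance (nums : List Int) (k : Int) (m : Int) (out : Int) : Decidable (Spec_min_valid_index nums k m out) := by unfold Spec_min_valid_index; infer_instance

-- ===== CLAIM (what is proved, stated in full; the proofs are below) =====
def Claim_equal_min_valid_index : Prop := ∀ (nums : List Int) (k : Int) (m : Int), Dom_min_valid_index nums k m → Pre_min_valid_index nums k m → Spec_min_valid_index nums k m (min_valid_index nums k m)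

-- ===== LEMMAS AND PROOFS =====

-- the list of partial sums starting after accumulated value a
def pvScan (a : Int) : List Int → List Int
  | [] => []
  | x :: xs => (a + x) :: pvScan (a + x) xs

theorem pvScan_length (l : List Int) : ∀ a : Int, (pvScan a l).length = l.length := by
  induction l with
  | nil => intro a; rfl
  | cons x xs ih => intro a; simp [pvScan, ih]

theorem pvScan_getD (l : List Int) : ∀ (a : Int) (j : Nat), j < l.length →
    (pvScan a l).getD j 0 = a + (l.take (j + 1)).sum := by
  induction l with
  | nil => intro a j h; simp at h
  | cons x xs ih =>
    intro a j h
    cases j with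
    | zero => simp [pvScan]
    | succ j =>
      simp only [pvScan, List.getD_cons_succ, List.take_succ_cons, List.sum_cons]
      rw [ih (a + x) j (by simpa using h)]
      ring

theorem pvPrefixA_foldl (l : List Int) : ∀ (pre : List Int) (a : Int),
    l.foldl (fun ps x => ps ++ [PySem.List.pyGetD ps (-1) 0 + x]) (pre ++ [a])
      = pre ++ [a] ++ pvScan a l := by
  induction l with
  | nil => intro pre a; simp [pvScan]
  | cons x xs ih =>
    intro pre a
    simp only [List.foldl_cons, PySem.List.pyGetD_neg_one_append_singleton, pvScan]
    rw [ih (pre ++ [a]) (a + x)]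
    simp

theorem pvPrefixA_eq (nums : List Int) : pvPrefixA nums = 0 :: pvScan 0 nums := by
  have h := pvPrefixA_foldl nums [] 0
  simpa [pvPrefixA] using h

theorem pvPrefixA_length (nums : List Int) : (pvPrefixA nums).length = nums.length + 1 := by
  rw [pvPrefixA_eq]; simp [pvScan_length]

theorem pvPrefixA_getD (nums : List Int) (j : Nat) (h : j ≤ nums.length) :
    (pvPrefixA nums).getD j 0 = (nums.take j).sum := by
  rw [pvPrefixA_eq]
  cases j with
  | zero => simp
  | succ j =>
    simp only [List.getD_cons_succ]
    rw [pvScan_getD nums 0 j (by omega)]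
    simp

-- empty range
theorem pvRange_nil (a b : Int) (h : b ≤ a) : PySem.List.pyRange a b 1 = [] := by
  simp [PySem.List.pyRange]; omega

-- the sliding loop of B computes exactly A's scan over the prefix sums, start indices a, a+1, …
theorem pv_loop_eq (nums : List Int) (k m : Int) (K : Nat) (hK : (K : Int) = k + 1) :
    ∀ (c a : Nat) (s : Int), 1 ≤ a → (a : Int) + c = (nums.length : Int) - k →
      s = (nums.take (a - 1 + K)).sum - (nums.take (a - 1)).sum →
      pvFindA (pvPrefixA nums) k m (PySem.List.pyRange (a : Int) ((nums.length : Int) - k) 1)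
        = pvSlideB nums k m s (PySem.List.pyRange (a : Int) ((nums.length : Int) - k) 1) := by
  intro c
  induction c with
  | zero =>
    intro a s _ hac _
    rw [pvRange_nil _ _ (by omega)]
    rfl
  | succ c ih =>
    intro a s ha hac hs
    have hlt : (a : Int) < (nums.length : Int) - k := by omega
    rw [PySem.List.pyRange_one_cons hlt]
    -- bounds (all in Nat)
    have haK : a + K ≤ nums.length := by omega
    have haK1 : 1 ≤ a + K := by omega
    have han : a ≤ nums.length := by omega
    have han1 : a - 1 < nums.length := by omega
    have haKn : a + K - 1 < nums.length := by omega
    -- A's test value at index a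
    have hA1 : PySem.List.pyGetD (pvPrefixA nums) ((a : Int) + k + 1) 0
        = (nums.take (a + K)).sum := by
      have : (a : Int) + k + 1 = ((a + K : Nat) : Int) := by push_cast; omega
      rw [this, PySem.List.pyGetD_natCast, pvPrefixA_getD nums (a + K) haK]
    have hA2 : PySem.List.pyGetD (pvPrefixA nums) (a : Int) 0 = (nums.take a).sum := by
      rw [PySem.List.pyGetD_natCast, pvPrefixA_getD nums a han]
    -- B's updated running sum at index a
    have hB1 : PySem.List.pyGetD nums ((a : Int) + k) 0 = nums[a + K - 1] := by
      have : (a : Int) + k = ((a + K - 1 : Nat) : Int) := by omega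
      rw [this, PySem.List.pyGetD_natCast, List.getD_eq_getElem nums 0 haKn]
    have hB2 : PySem.List.pyGetD nums ((a : Int) - 1) 0 = nums[a - 1] := by
      have : (a : Int) - 1 = ((a - 1 : Nat) : Int) := by omega
      rw [this, PySem.List.pyGetD_natCast, List.getD_eq_getElem nums 0 han1]
    have hsum1 : (nums.take (a + K)).sum = (nums.take (a - 1 + K)).sum + nums[a + K - 1] := by
      have h := List.sum_take_succ nums (a + K - 1) haKn
      have e3 : a + K - 1 + 1 = a + K := by omega
      have e2 : a - 1 + K = a + K - 1 := by omega
      rw [e3] at h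
      rw [e2]
      exact h
    have hsum2 : (nums.take a).sum = (nums.take (a - 1)).sum + nums[a - 1] := by
      have e : a = (a - 1) + 1 := by omega
      conv_lhs => rw [e]
      rw [List.sum_take_succ nums (a - 1) han1]
    have hs' : s + PySem.List.pyGetD nums ((a : Int) + k) 0 - PySem.List.pyGetD nums ((a : Int) - 1) 0
        = (nums.take (a + K)).sum - (nums.take a).sum := by
      rw [hB1, hB2, hs, hsum1, hsum2]; ring
    simp only [pvFindA, pvSlideB, hA1, hA2, hs']
    by_cases hm : (nums.take (a + K)).sum - (nums.take a).sum = m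
    · simp [hm]
    · simp only [hm, ite_false]
      have hcast : (a : Int) + 1 = ((a + 1 : Nat) : Int) := by push_cast; ring
      rw [hcast]
      exact ih (a + 1) _ (by omega) (by push_cast; omega) (by simp)

theorem pv_main (nums : List Int) (k m : Int) (hk : -1 ≤ k) :
    min_valid_index nums k m = min_valid_index_alt nums k m := by
  simp only [min_valid_index, min_valid_index_alt, pvPrefixA_length]
  have hb : ((nums.length + 1 : Nat) : Int) - k - 1 = (nums.length : Int) - k := by
    push_cast; ring
  rw [hb]
  by_cases h0 : (nums.length : Int) - k ≤ 0
  · rw [pvRange_nil _ _ (by omega)]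
    simp [h0, pvFindA]
  · -- peel A's first iteration i = 0
    have hlt : (0 : Int) < (nums.length : Int) - k := by omega
    rw [PySem.List.pyRange_one_cons hlt]
    set K : Nat := (k + 1).toNat with hKdef
    have hK : (K : Int) = k + 1 := by omega
    have hKn : K ≤ nums.length := by omega
    -- A's test at i = 0
    have hA1 : PySem.List.pyGetD (pvPrefixA nums) ((0 : Int) + k + 1) 0 = (nums.take K).sum := by
      have : (0 : Int) + k + 1 = ((K : Nat) : Int) := by omega
      rw [this, PySem.List.pyGetD_natCast, pvPrefixA_getD nums K hKn]
    have hA2 : PySem.List.pyGetD (pvPrefixA nums) (0 : Int) 0 = 0 := by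
      rw [PySem.List.pyGetD_zero, pvPrefixA_getD nums 0 (by omega)]
      simp
    -- B's initial sum
    have hB0 : (PySem.List.slice nums none (some (k + 1))).sum = (nums.take K).sum := by
      rw [PySem.List.slice_to nums (by omega)]
    simp only [pvFindA, hA1, hA2, if_neg h0, hB0, sub_zero]
    by_cases hm : (nums.take K).sum = m
    · simp [hm]
    · simp only [hm, ite_false]
      have h1 : ((1 : Nat) : Int) = (0 : Int) + 1 := by simp
      have := pv_loop_eq nums k m K hK ((nums.length : Int) - k - 1).toNat 1
        ((nums.take K).sum) (by omega) (by omega) (by simp)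
      simpa using this

-- ===== VERDICT (by name: the statement is the Claim_ definition above) =====
theorem min_valid_index_spec : Claim_equal_min_valid_index := by
  intro nums k m _ hpre
  unfold Spec_min_valid_index
  exact pv_main nums k m hpre
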